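-- pv_equiv track=rewrite | github.com/CedricDaGoat/ProjetGMD | meddra_indexer.py | rechercher_medicaments_meddra
-- ===== SOURCE A (Python) =====
-- def rechercher_medicaments_meddra(symptomes, index, logique='OU'):
--     """
--     Recherche des médicaments en fonction des symptômes donnés, avec une option 'ET' ou 'OU'.
--
--     Args:
--         symptomes (list): Liste des symptômes à rechercher.
--         index (dict): Index des symptômes aux médicaments.
--         logique (str): 'ET' si tous les symptômes doivent être présents, 'OU' si seulement une partie.
--
--     Returns:
--         list: Liste des noms des médicaments correspondant à la recherche.
--     """
--     if not symptomes:  # Vérifie si la liste des symptômes est vide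
--         return []
--
--     # Récupérer la liste des sets de médicaments associés à chaque symptôme
--     medicaments_par_symptome = [index.get(symptome, set()) for symptome in symptomes]
--
--     # Supprimer les ensembles vides (pour éviter les problèmes avec l'intersection)
--     medicaments_par_symptome = [med for med in medicaments_par_symptome if med]
--
--     if not medicaments_par_symptome:  # Si aucun symptôme n'a donné de médicaments
--         return []
--
--     # Cas 'ET' : Trouver l'intersection de tous les médicaments (médicaments communs à tous les symptômes)
--     if logique == 'ET':
--         resultats = set.intersection(*medicaments_par_symptome)
--     # Cas 'OU' : Trouver l'union de tous les médicaments (médicaments liés à au moins un symptôme)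
--     else:
--         resultats = set.union(*medicaments_par_symptome)
--
--     # EXTRAIRE UNIQUEMENT LES NOMS DES MÉDICAMENTS
--     return sorted({nom for _, nom in resultats})
-- ===== SOURCE B (Python) =====
-- def rechercher_medicaments_meddra(symptomes, index, logique='OU'):
--     if not symptomes:
--         return []
--
--     # Non-empty medication sets, one per symptom that has any hits
--     sets = [s for s in (index.get(sym, set()) for sym in symptomes) if s]
--     if not sets:
--         return []
--
--     # Count, for each medication tuple, in how many of those sets it appears
--     cnt = {}
--     for s in sets:
--         for med in s:
--             cnt[med] = cnt.get(med, 0) + 1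
--
--     # 'ET' needs membership in every non-empty set; anything else ('OU') needs one
--     seuil = len(sets) if logique == 'ET' else 1
--     return sorted({nom for (_, nom), c in cnt.items() if c >= seuil})
-- ===== Notes on version B (the rewrite author's own statement) =====
-- stated objective: alternative
-- what changed: Replaces the fold of set.intersection/set.union over the per-symptom sets by a single frequency count (dict) over the flattened non-empty sets, selecting medications whose count reaches len(sets) ('ET') or 1 (otherwise), then projecting and sorting the names.
import Mathlib
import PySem

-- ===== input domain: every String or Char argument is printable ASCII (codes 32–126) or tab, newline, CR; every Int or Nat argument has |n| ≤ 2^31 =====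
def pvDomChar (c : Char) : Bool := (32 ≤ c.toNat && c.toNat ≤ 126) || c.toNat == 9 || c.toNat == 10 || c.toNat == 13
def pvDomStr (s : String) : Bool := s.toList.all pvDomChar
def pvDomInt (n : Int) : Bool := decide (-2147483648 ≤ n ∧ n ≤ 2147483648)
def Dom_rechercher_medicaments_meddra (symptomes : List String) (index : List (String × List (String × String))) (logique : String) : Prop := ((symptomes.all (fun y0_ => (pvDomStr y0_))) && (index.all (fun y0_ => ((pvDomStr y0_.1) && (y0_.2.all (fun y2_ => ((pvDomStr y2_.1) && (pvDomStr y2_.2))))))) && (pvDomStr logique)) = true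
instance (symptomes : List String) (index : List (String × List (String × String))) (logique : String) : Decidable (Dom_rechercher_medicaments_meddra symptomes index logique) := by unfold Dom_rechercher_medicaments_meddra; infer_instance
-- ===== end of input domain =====

-- B replaces the set intersection/union folds by a single frequency count over the
-- flattened non-empty medication sets (alternative decomposition, same cost).

-- ===== PORT A =====
def rechercher_medicaments_meddra (symptomes : List String) (index : List (String × List (String × String))) (logique : String) : List String :=
  if symptomes = [] then []
  else
    let medicamentsParSymptome := symptomes.map (fun symptome => PySem.Dict.getD (PySem.Dict.mk index) symptome [])
    let medicamentsParSymptome2 := medicamentsParSymptome.filter (fun med => !med.isEmpty)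
    match medicamentsParSymptome2 with
    | [] => []
    | m0 :: rest =>
        let resultats := if logique = "ET" then rest.foldl PySem.Set.inter m0 else rest.foldl PySem.Set.union m0
        PySem.List.sorted (PySem.Set.ofList (resultats.map (fun p => p.2))) (fun x => x) false

-- ===== PORT B =====
def rechercher_medicaments_meddra_alt (symptomes : List String) (index : List (String × List (String × String))) (logique : String) : List String :=
  if symptomes = [] then []
  else
    let sets := (symptomes.map (fun sym => PySem.Dict.getD (PySem.Dict.mk index) sym [])).filter (fun s => !s.isEmpty)
    if sets = [] then []
    else
      let cnt := sets.foldl (fun d s => s.foldl (fun d med => d.insert med (d.getD med 0 + 1)) d) PySem.Dict.empty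
      let seuil : Int := if logique = "ET" then (PySem.List.len sets) else 1
      PySem.List.sorted (PySem.Set.ofList (((cnt.items).filter (fun p => decide (seuil ≤ p.2))).map (fun p => p.1.2))) (fun x => x) false

-- ===== PRECONDITION & SPEC =====
-- Pre_ only requires each dict value to be a valid encoding of a Python set (no duplicate
-- elements); every input the Python function can receive satisfies this, so nothing of
-- A's Python domain is excluded.
def Pre_rechercher_medicaments_meddra (symptomes : List String) (index : List (String × List (String × String))) (logique : String) : Prop :=
  ∀ kv ∈ index, kv.2.Nodup
instance (symptomes : List String) (index : List (String × List (String × String))) (logique : String) : Decidable (Pre_rechercher_medicaments_meddra symptomes index logique) := by unfold Pre_rechercher_medicaments_meddra; infer_instance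

def pvWitness_rechercher_medicaments_meddra : List String × (List (String × List (String × String))) × String :=
  (["maux"], [("maux", [("C1", "aspirine"), ("C2", "doliprane")])], "OU")

def Spec_rechercher_medicaments_meddra (symptomes : List String) (index : List (String × List (String × String))) (logique : String) (out : List String) : Prop := out = rechercher_medicaments_meddra_alt symptomes index logique
instance (symptomes : List String) (index : List (String × List (String × String))) (logique : String) (out : List String) : Decidable (Spec_rechercher_medicaments_meddra symptomes index logique out) := by unfold Spec_rechercher_medicaments_meddra; infer_instance

-- ===== CLAIM (what is proved, stated in full; the proofs are below) =====
def Claim_equal_rechercher_medicaments_meddra : Prop := ∀ (symptomes : List String) (index : List (String × List (String × String))) (logique : String), Dom_rechercher_medicaments_meddra symptomes index logique → Pre_rechercher_medicaments_meddra symptomes index logique → Spec_rechercher_medicaments_meddra symptomes index logique (rechercher_medicaments_meddra symptomes index logique)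

-- ===== LEMMAS AND PROOFS =====

-- a foldl over a flattened list of lists is the nested foldl
lemma pv_foldl_flatMap {β σ : Type} (l : List (List β)) (g : σ → β → σ) (d : σ) :
    l.foldl (fun d s => s.foldl g d) d = (l.flatMap (fun s => s)).foldl g d := by
  induction l generalizing d with
  | nil => rfl
  | cons x xs ih => simp [List.flatMap_cons, List.foldl_append, ih]

-- every dict lookup with default [] yields [] or one of the stored (Nodup) values
lemma pv_getD_nodup (index : List (String × List (String × String)))
    (h : ∀ kv ∈ index, kv.2.Nodup) (k : String) :
    (PySem.Dict.getD (PySem.Dict.mk index) k []).Nodup := by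
  unfold PySem.Dict.getD PySem.Dict.get?
  rcases hf : List.find? (fun p => p.1 == k) (PySem.Dict.mk index).items with _ | p
  · simp [hf]
  · simp only [hf, Option.map_some, Option.getD_some]
    exact h p (List.mem_of_find?_eq_some hf)

lemma pv_mem_foldl_inter (rest : List (PySem.Set (String × String))) (m0 : PySem.Set (String × String)) (x : String × String) :
    x ∈ rest.foldl PySem.Set.inter m0 ↔ x ∈ m0 ∧ ∀ t ∈ rest, x ∈ t := by
  induction rest generalizing m0 with
  | nil => simp
  | cons t ts ih =>
      simp only [List.foldl_cons, ih, PySem.Set.mem_inter, List.forall_mem_cons]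
      tauto

lemma pv_mem_foldl_union (rest : List (PySem.Set (String × String))) (m0 : PySem.Set (String × String)) (x : String × String) :
    x ∈ rest.foldl PySem.Set.union m0 ↔ x ∈ m0 ∨ ∃ t ∈ rest, x ∈ t := by
  induction rest generalizing m0 with
  | nil => simp
  | cons t ts ih =>
      simp only [List.foldl_cons, ih, PySem.Set.mem_union, List.mem_cons]
      aesop

-- occurrence count over the flattening = number of (Nodup) sets containing the element
lemma pv_count_flat (sets : List (List (String × String))) (hnd : ∀ t ∈ sets, t.Nodup) (x : String × String) :
    (sets.flatMap (fun s => s)).count x = sets.countP (fun t => decide (x ∈ t)) := by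
  induction sets with
  | nil => rfl
  | cons t ts ih =>
    simp only [List.flatMap_cons, List.count_append, List.countP_cons]
    rw [ih (fun u hu => hnd u (List.mem_cons_of_mem _ hu))]
    by_cases hx : x ∈ t
    · rw [List.count_eq_one_of_mem (hnd t List.mem_cons_self) hx]; simp [hx]; omega
    · rw [List.count_eq_zero_of_not_mem hx]; simp [hx]

-- ===== VERDICT (by name: the statement is the Claim_ definition above) =====
theorem rechercher_medicaments_meddra_spec : Claim_equal_rechercher_medicaments_meddra := by
  intro symptomes index logique _ hpre
  unfold Spec_rechercher_medicaments_meddra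
  unfold rechercher_medicaments_meddra rechercher_medicaments_meddra_alt
  by_cases hs : symptomes = []
  · simp [hs]
  simp only [if_neg hs]
  set sets := (symptomes.map (fun sym => PySem.Dict.getD (PySem.Dict.mk index) sym [])).filter (fun s => !s.isEmpty) with hsets
  have hnd : ∀ t ∈ sets, t.Nodup := by
    intro t ht
    rw [hsets] at ht
    rcases List.mem_map.mp (List.mem_of_mem_filter ht) with ⟨sym, _, rfl⟩
    exact pv_getD_nodup index hpre sym
  cases hcase : sets with
  | nil => simp
  | cons m0 rest =>
    simp only [if_neg (List.cons_ne_nil m0 rest)]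
    rw [PySem.List.sorted_id_eq_sorted_id_iff_perm]
    rw [List.perm_ext_iff_of_nodup (PySem.Set.nodup_ofList _) (PySem.Set.nodup_ofList _)]
    intro a
    -- rewrite B's counter into counts over the flattening
    have hcnt : ((m0 :: rest).foldl (fun d s => s.foldl (fun d med => d.insert med (d.getD med 0 + 1)) d) PySem.Dict.empty)
        = PySem.Dict.counter ((m0 :: rest).flatMap (fun s => s)) := by
      rw [pv_foldl_flatMap, PySem.Dict.foldl_insert_getD_add_one_eq_counter]
    rw [hcnt]
    have hall : ∀ t ∈ (m0 :: rest), t.Nodup := by rw [hcase] at hnd; exact hnd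
    set all := (m0 :: rest).flatMap (fun s => s) with hallDef
    -- pointwise: membership in A's result set ↔ the count threshold of B
    have hpoint : ∀ x : String × String,
        (x ∈ (if logique = "ET" then rest.foldl PySem.Set.inter m0 else rest.foldl PySem.Set.union m0))
        ↔ (x ∈ all ∧ (if logique = "ET" then (PySem.List.len (m0 :: rest)) else 1) ≤ (all.count x : Int)) := by
      intro x
      have hcount : all.count x = (m0 :: rest).countP (fun t => decide (x ∈ t)) := pv_count_flat _ hall x
      by_cases hlog : logique = "ET"
      · rw [if_pos hlog, if_pos hlog, pv_mem_foldl_inter, hcount]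
        simp only [PySem.List.len_eq]
        constructor
        · rintro ⟨h0, hrest⟩
          have hmem : x ∈ all := by
            rw [hallDef]; exact List.mem_flatMap.mpr ⟨m0, List.mem_cons_self, h0⟩
          have : (m0 :: rest).countP (fun t => decide (x ∈ t)) = (m0 :: rest).length := by
            rw [List.countP_eq_length]
            intro t ht
            rcases List.mem_cons.mp ht with rfl | ht
            · simpa using h0
            · simpa using hrest t ht
          rw [this]
          exact ⟨hmem, le_refl _⟩
        · rintro ⟨_, hle⟩
          have hle' : (m0 :: rest).length ≤ (m0 :: rest).countP (fun t => decide (x ∈ t)) := by exact_mod_cast hle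
          have heq : (m0 :: rest).countP (fun t => decide (x ∈ t)) = (m0 :: rest).length :=
            le_antisymm List.countP_le_length hle'
          have hfa := List.countP_eq_length.mp heq
          refine ⟨by simpa using hfa m0 List.mem_cons_self, fun t ht => by simpa using hfa t (List.mem_cons_of_mem _ ht)⟩
      · rw [if_neg hlog, if_neg hlog, pv_mem_foldl_union]
        constructor
        · intro h
          have hmem : x ∈ all := by
            rw [hallDef]
            rcases h with h0 | ⟨t, ht, hx⟩
            · exact List.mem_flatMap.mpr ⟨m0, List.mem_cons_self, h0⟩
            · exact List.mem_flatMap.mpr ⟨t, List.mem_cons_of_mem _ ht, hx⟩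
          refine ⟨hmem, ?_⟩
          have : 0 < all.count x := List.count_pos_iff.mpr hmem
          omega
        · rintro ⟨hmem, _⟩
          rw [hallDef] at hmem
          rcases List.mem_flatMap.mp hmem with ⟨t, ht, hx⟩
          rcases List.mem_cons.mp ht with rfl | ht
          · exact Or.inl hx
          · exact Or.inr ⟨t, ht, hx⟩
    -- finish: both sides are the projected names of the same set of medications
    rw [PySem.Dict.items_counter, List.filter_map, List.map_map]
    simp only [PySem.Set.mem_ofList, List.mem_map, List.mem_filter, Function.comp, decide_eq_true_eq]
    constructor
    · rintro ⟨x, hx, rfl⟩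
      have := (hpoint x).mp hx
      exact ⟨x, ⟨this.1, this.2⟩, rfl⟩
    · rintro ⟨k, ⟨hk, hle⟩, rfl⟩
      exact ⟨k, (hpoint k).mpr ⟨hk, hle⟩, rfl⟩
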